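-- pv_equiv track=rewrite | github.com/ikeisuke/jailrun | lib/proxy.py | match_domain
-- ===== SOURCE A (Python) =====
-- def match_domain(host: str, allowed: set[str]) -> bool:
--     """Check if host matches any allowed domain (exact or wildcard)."""
--     host = host.lower()
--     if host in allowed:
--         return True
--     # Check wildcard: *.example.com matches sub.example.com
--     parts = host.split(".")
--     for i in range(1, len(parts)):
--         wildcard = "*." + ".".join(parts[i:])
--         if wildcard in allowed:
--             return True
--     return False
-- ===== SOURCE B (Python) =====
-- def match_domain(host: str, allowed: set[str]) -> bool:
--     """Check if host matches any allowed domain (exact or wildcard)."""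
--     host = host.lower()
--     for d in allowed:
--         if d == host:
--             return True
--         if d.startswith("*.") and host.endswith("." + d[2:]):
--             return True
--     return False
-- ===== Notes on version B (the rewrite author's own statement) =====
-- stated objective: alternative
-- what changed: Instead of generating every dot-suffix wildcard pattern from the host and probing the allowed set, B scans the allowed patterns once and tests each directly (equality, or '*.'-prefix plus a dot-boundary endswith on the host).
import Mathlib
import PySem

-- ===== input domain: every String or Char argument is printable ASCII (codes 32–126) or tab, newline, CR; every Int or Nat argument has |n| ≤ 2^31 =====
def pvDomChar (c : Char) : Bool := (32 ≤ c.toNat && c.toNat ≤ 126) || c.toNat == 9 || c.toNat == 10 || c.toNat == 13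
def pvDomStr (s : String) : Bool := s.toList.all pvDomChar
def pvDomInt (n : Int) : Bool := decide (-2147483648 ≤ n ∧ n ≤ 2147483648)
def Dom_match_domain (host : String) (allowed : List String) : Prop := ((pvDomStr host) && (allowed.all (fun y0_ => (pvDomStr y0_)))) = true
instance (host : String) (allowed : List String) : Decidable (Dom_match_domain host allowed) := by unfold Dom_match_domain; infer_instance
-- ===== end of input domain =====

-- B replaces A's host-derived wildcard probes against the allowed set by one direct scan of
-- the allowed patterns (equality, or '*.'-prefix plus dot-boundary endswith) — alternative
-- decomposition, same results.

-- ===== PORT A =====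
-- A: lowercase host; exact membership test; then for i in range(1, len(parts)) probe
-- "*." + ".".join(parts[i:]) against allowed.  (String contents handled on .toList,
-- membership of the built string tested against the .toList image of allowed.)
def match_domain (host : String) (allowed : List String) : Bool :=
  let h := PySem.Chars.lower host.toList
  let allowedL := allowed.map String.toList
  if allowedL.contains h then true
  else
    let parts := PySem.Chars.splitOn h ['.']
    (PySem.List.pyRange 1 (parts.length : Int) 1).any (fun i =>
      allowedL.contains ('*' :: '.' :: PySem.Chars.join ['.'] (PySem.List.slice parts (some i) none)))

-- ===== PORT B =====
-- B: lowercase host; single scan over allowed: d == host, or d.startswith("*.") and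
-- host.endswith("." + d[2:]).
def match_domain_alt (host : String) (allowed : List String) : Bool :=
  let h := PySem.Chars.lower host.toList
  allowed.any (fun d =>
    let dl := d.toList
    dl == h ||
      (PySem.Chars.startswith dl ['*', '.'] &&
        PySem.Chars.endswith h ('.' :: PySem.Chars.slice dl (some 2) none)))

-- ===== PRECONDITION & SPEC =====
def Spec_match_domain (host : String) (allowed : List String) (out : Bool) : Prop := out = match_domain_alt host allowed
instance (host : String) (allowed : List String) (out : Bool) : Decidable (Spec_match_domain host allowed out) := by unfold Spec_match_domain; infer_instance

-- ===== CLAIM (what is proved, stated in full; the proofs are below) =====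
def Claim_equal_match_domain : Prop := ∀ (host : String) (allowed : List String), Dom_match_domain host allowed → Spec_match_domain host allowed (match_domain host allowed)

-- ===== LEMMAS AND PROOFS =====

-- PySem's fuelled splitOn agrees with Mathlib's List.splitOn for a one-character separator.
theorem pvGo_spec (c : Char) : ∀ (fuel : Nat) (l cur : List Char) (acc : List (List Char)),
    l.length < fuel →
    PySem.Chars.splitOn.go [c] fuel l cur acc
      = acc.reverse ++ (l.splitOnP (· == c)).modifyHead (cur.reverse ++ ·) := by
  intro fuel
  induction fuel with
  | zero => intro l cur acc hl; omega
  | succ f ih =>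
    intro l cur acc hl
    cases l with
    | nil =>
      show (cur.reverse :: acc).reverse = _
      simp
    | cons x rest =>
      have hstep : PySem.Chars.splitOn.go [c] (f + 1) (x :: rest) cur acc
          = if [c].isPrefixOf (x :: rest)
            then PySem.Chars.splitOn.go [c] f (List.drop 1 (x :: rest)) [] (cur.reverse :: acc)
            else PySem.Chars.splitOn.go [c] f rest (x :: cur) acc := rfl
      have hpre : [c].isPrefixOf (x :: rest) = (c == x) := by simp [List.isPrefixOf]
      rw [hstep, hpre]
      have hrest : rest.length < f := by simpa using Nat.lt_of_succ_lt_succ hl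
      obtain ⟨p, ps, hps⟩ := List.exists_cons_of_ne_nil (List.splitOnP_ne_nil (· == c) rest)
      by_cases hxc : x = c
      · rw [if_pos (by simp [hxc])]
        simp only [List.drop_succ_cons, List.drop_zero]
        rw [ih _ _ _ hrest]
        simp [List.splitOnP_cons, hxc, hps]
      · have hneg : ¬ ((c == x) = true) := fun hcx => hxc (beq_iff_eq.mp hcx).symm
        rw [if_neg hneg]
        rw [ih _ _ _ hrest]
        simp [List.splitOnP_cons, hxc, hps, List.modifyHead]

theorem pvSplitOn_eq (c : Char) (l : List Char) :
    PySem.Chars.splitOn l [c] = l.splitOn c := by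
  show PySem.Chars.splitOn.go [c] (l.length + 1) l [] [] = _
  rw [pvGo_spec c (l.length + 1) l [] [] (by omega)]
  obtain ⟨p, ps, hps⟩ := List.exists_cons_of_ne_nil (List.splitOnP_ne_nil (· == c) l)
  simp [List.splitOn, hps]

theorem pvIntercalate_cons2 {α : Type} (x : α) (a b : List α) (t : List (List α)) :
    [x].intercalate (a :: b :: t) = a ++ x :: [x].intercalate (b :: t) := by
  simp [List.intercalate, List.intersperse_cons₂]

-- joining a dropped tail of the split is a separator-bounded suffix …
theorem pvDrop_suffix {α : Type} (x : α) (P : List (List α)) :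
    ∀ j, 0 < j → j < P.length →
      (x :: [x].intercalate (P.drop j)) <:+ [x].intercalate P := by
  induction P with
  | nil => intro j h1 h2; simp at h2
  | cons p ps ih =>
    intro j h1 h2
    cases ps with
    | nil => simp at h2; omega
    | cons q t =>
      rw [pvIntercalate_cons2]
      match j, h1 with
      | 1, _ =>
        exact List.suffix_append p _
      | (k + 2), _ =>
        have hk := ih (k + 1) (by omega) (by simp at h2 ⊢; omega)
        exact hk.trans ((List.suffix_cons x _).trans (List.suffix_append p _))

-- … and conversely every separator-bounded suffix arises that way.
theorem pvSuffix_drop (c : Char) (h S : List Char) (hs : (c :: S) <:+ h) :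
    ∃ j, 1 ≤ j ∧ j < (h.splitOn c).length ∧ S = [c].intercalate ((h.splitOn c).drop j) := by
  obtain ⟨t, ht⟩ := hs
  have hP : h.splitOn c = t.splitOn c ++ S.splitOn c := by
    rw [← ht]
    simpa [List.splitOn] using List.splitOnP_append_cons (· == c) t S c (by simp)
  have ht1 : 1 ≤ (t.splitOn c).length :=
    List.length_pos_of_ne_nil (List.splitOnP_ne_nil (· == c) t)
  have hS1 : 1 ≤ (S.splitOn c).length :=
    List.length_pos_of_ne_nil (List.splitOnP_ne_nil (· == c) S)
  refine ⟨(t.splitOn c).length, ht1, ?_, ?_⟩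
  · rw [hP]; simp; omega
  · rw [hP, List.drop_left, List.intercalate_splitOn]

-- per-pattern equivalence of B's test with A's generated-candidate membership
theorem pvPattern_iff (dl h : List Char) :
    ((PySem.Chars.startswith dl ['*', '.'] &&
        PySem.Chars.endswith h ('.' :: PySem.Chars.slice dl (some 2) none)) = true)
      ↔ ∃ j : Nat, 1 ≤ j ∧ j < (h.splitOn '.').length ∧
          dl = '*' :: '.' :: [(('.') : Char)].intercalate ((h.splitOn '.').drop j) := by
  have hs2 : PySem.Chars.slice dl (some 2) none = dl.drop 2 := by
    rw [PySem.Chars.slice_eq_listSlice, PySem.List.slice_from _ (by norm_num)]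
    rfl
  constructor
  · rintro hb
    rw [Bool.and_eq_true] at hb
    obtain ⟨h1, h2⟩ := hb
    rw [PySem.Chars.startswith_iff] at h1
    rw [PySem.Chars.endswith_iff, hs2] at h2
    obtain ⟨r, hr⟩ := h1
    have hdl : dl = '*' :: '.' :: dl.drop 2 := by rw [← hr]; rfl
    obtain ⟨j, hj1, hj2, hj3⟩ := pvSuffix_drop '.' h (dl.drop 2) h2
    exact ⟨j, hj1, hj2, by rw [hdl, ← hj3]⟩
  · rintro ⟨j, hj1, hj2, rfl⟩
    rw [Bool.and_eq_true]
    constructor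
    · rw [PySem.Chars.startswith_iff]
      exact ⟨_, rfl⟩
    · rw [PySem.Chars.endswith_iff, hs2]
      have := pvDrop_suffix '.' (h.splitOn '.') j (by omega) hj2
      rw [List.intercalate_splitOn] at this
      simpa using this
  -- note: dl.drop 2 of the constructed pattern is the intercalate, definitional

-- central equivalence on the list level
theorem pvMain (h : List Char) (AL : List (List Char)) :
    (if AL.contains h then true
     else (PySem.List.pyRange 1 ((PySem.Chars.splitOn h ['.']).length : Int) 1).any (fun i =>
        AL.contains ('*' :: '.' :: PySem.Chars.join ['.']
          (PySem.List.slice (PySem.Chars.splitOn h ['.']) (some i) none))))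
    = AL.any (fun dl => dl == h ||
        (PySem.Chars.startswith dl ['*', '.'] &&
          PySem.Chars.endswith h ('.' :: PySem.Chars.slice dl (some 2) none))) := by
  have hlen : (PySem.Chars.splitOn h ['.']).length = (h.splitOn '.').length := by
    rw [pvSplitOn_eq]
  by_cases hmem : h ∈ AL
  · rw [if_pos (by simpa using hmem)]
    symm
    rw [List.any_eq_true]
    exact ⟨h, hmem, by simp⟩
  · rw [if_neg (by simpa using hmem)]
    rw [Bool.eq_iff_iff]
    simp only [List.any_eq_true, List.contains_iff_mem]
    constructor
    · rintro ⟨i, hi, hcont⟩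
      rw [PySem.List.mem_pyRange_one] at hi
      obtain ⟨hi1, hi2⟩ := hi
      have h0i : 0 ≤ i := by omega
      refine ⟨_, hcont, ?_⟩
      rw [Bool.or_eq_true]
      right
      rw [pvPattern_iff]
      refine ⟨i.toNat, by omega, by rw [hlen] at hi2; omega, ?_⟩
      rw [PySem.List.slice_from _ h0i, pvSplitOn_eq]
      rfl
    · rintro ⟨dl, hdl, hcase⟩
      rcases Bool.or_eq_true _ _ |>.mp hcase with heq | hpat
      · have hdh : dl = h := by simpa using heq
        exact absurd (hdh ▸ hdl) hmem
      · rw [pvPattern_iff] at hpat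
        obtain ⟨j, hj1, hj2, hj3⟩ := hpat
        refine ⟨(j : Int), ?_, ?_⟩
        · rw [PySem.List.mem_pyRange_one]
          constructor
          · exact_mod_cast hj1
          · rw [hlen]; exact_mod_cast hj2
        · rw [PySem.List.slice_from_natCast, pvSplitOn_eq]
          have : ('*' :: '.' :: PySem.Chars.join ['.'] ((h.splitOn '.').drop j)) = dl := by
            rw [hj3]; rfl
          rwa [this]

-- the same statement with the String-level wrapping of the ports
theorem pvMain2 (h : List Char) (allowed : List String) :
    (if (allowed.map String.toList).contains h then true
     else (PySem.List.pyRange 1 ((PySem.Chars.splitOn h ['.']).length : Int) 1).any (fun i =>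
        (allowed.map String.toList).contains ('*' :: '.' :: PySem.Chars.join ['.']
          (PySem.List.slice (PySem.Chars.splitOn h ['.']) (some i) none))))
    = allowed.any (fun d => d.toList == h ||
        (PySem.Chars.startswith d.toList ['*', '.'] &&
          PySem.Chars.endswith h ('.' :: PySem.Chars.slice d.toList (some 2) none))) := by
  rw [pvMain h (allowed.map String.toList), List.any_map]
  rfl

-- ===== VERDICT (by name: the statement is the Claim_ definition above) =====
theorem match_domain_spec : Claim_equal_match_domain := by
  intro host allowed _
  show match_domain host allowed = match_domain_alt host allowed
  unfold match_domain match_domain_alt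
  exact pvMain2 (PySem.Chars.lower host.toList) allowed
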